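-- pv_equiv track=rewrite | github.com/Simalexa/Arcade-Games | tetrisRule.py | deleteLayer
-- ===== SOURCE A (Python) =====
-- def deleteLayer(elements, number):
--     for i in reversed(elements):
--         for element in reversed(i):
--             if element[1] == number:
--                 i.remove(element)
--     for i in range(len(elements)):
--         for j in range(len(elements[i])):
--             if elements[i][j][1] < number:
--                 elements[i][j][1] += 1
--     return elements
-- ===== SOURCE B (Python) =====
-- def deleteLayer(elements, number):
--     for row in elements:
--         kept = []
--         for e in row:
--             if e[1] == number:
--                 continue
--             if e[1] < number:
--                 e[1] += 1
--             kept.append(e)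
--         row[:] = kept
--     return elements
-- ===== Notes on version B (the rewrite author's own statement) =====
-- stated objective: simpler
-- what changed: Replaces A's two passes per row (a reverse-iteration .remove removal pass, then a separate index-based increment pass) with one fused forward pass per row that skips ==number elements, increments <number elements and writes the kept elements back via slice assignment, preserving the in-place mutation.
-- outside the precondition, e.g. on deleteLayer([[[1]]], 0): A raises IndexError, B raises IndexError
import Mathlib
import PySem

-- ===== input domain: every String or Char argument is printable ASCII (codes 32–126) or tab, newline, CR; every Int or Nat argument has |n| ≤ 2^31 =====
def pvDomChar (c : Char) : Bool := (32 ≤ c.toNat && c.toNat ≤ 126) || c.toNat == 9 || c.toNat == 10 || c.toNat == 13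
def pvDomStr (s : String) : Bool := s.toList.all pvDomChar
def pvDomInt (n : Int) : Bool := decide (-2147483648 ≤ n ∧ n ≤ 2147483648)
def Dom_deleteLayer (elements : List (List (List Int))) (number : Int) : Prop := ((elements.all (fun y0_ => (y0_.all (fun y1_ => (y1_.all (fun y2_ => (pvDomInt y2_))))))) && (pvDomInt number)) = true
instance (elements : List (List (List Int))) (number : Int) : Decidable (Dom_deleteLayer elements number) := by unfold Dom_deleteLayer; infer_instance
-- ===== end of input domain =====

-- B fuses A's two per-row passes (reverse-iteration .remove removal, then index-based increment)
-- into one forward pass per row; equivalence is about the RETURN value (both Pythons mutate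
-- `elements` in place in the same observable way).

-- ===== PORT A =====
-- one step of `for element in reversed(i)`: the reverse iterator reads index k of the LIVE list
-- (nothing if out of range), and `i.remove(element)` deletes the first occurrence.
def pvRemStep (number : Int) (cur : List (List Int)) (k : Nat) : List (List Int) :=
  match PySem.List.pyGet? cur (k : Int) with
  | none => cur
  | some e =>
      if PySem.List.pyGet? e 1 = some number then (PySem.List.remove? cur e).getD cur else cur

-- the reverse iterator's countdown: fuel k+1 means the iterator is at index k
def pvRemLoop (number : Int) : Nat → List (List Int) → List (List Int)
  | 0, cur => cur
  | k + 1, cur => pvRemLoop number k (pvRemStep number cur k)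

-- `elements[i][j][1] += 1` when `elements[i][j][1] < number` (read then write index 1)
def pvIncElem (number : Int) (e : List Int) : List Int :=
  match PySem.List.pyGet? e 1 with
  | some v => if v < number then PySem.List.pySetD e 1 (v + 1) else e
  | none => e

-- outer `for i in reversed(elements)` only mutates each row independently, so row order is a map
def deleteLayer (elements : List (List (List Int))) (number : Int) : List (List (List Int)) :=
  let removed := elements.map (fun row => pvRemLoop number row.length row)
  removed.map (fun row => row.map (pvIncElem number))

-- ===== PORT B =====
-- single fused pass per row: drop ==number, bump <number, keep the rest
def pvKeep (number : Int) (e : List Int) : Option (List Int) :=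
  match PySem.List.pyGet? e 1 with
  | none => some e   -- Python raises here; outside Pre_
  | some v =>
      if v = number then none
      else if v < number then some (PySem.List.pySetD e 1 (v + 1))
      else some e

def deleteLayer_alt (elements : List (List (List Int))) (number : Int) : List (List (List Int)) :=
  elements.map (fun row => row.filterMap (pvKeep number))

-- ===== PRECONDITION & SPEC =====
-- Pre_ excludes grids with an inner element list of length < 2, on which both Pythons raise IndexError at e[1].
def Pre_deleteLayer (elements : List (List (List Int))) (number : Int) : Prop :=
  ∀ row ∈ elements, ∀ e ∈ row, 2 ≤ e.length
instance (elements : List (List (List Int))) (number : Int) : Decidable (Pre_deleteLayer elements number) := by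
  unfold Pre_deleteLayer; infer_instance

def pvWitness_deleteLayer : List (List (List Int)) × Int := ([[[0, 1], [2, 2]], [[3, 0]]], 1)

def Spec_deleteLayer (elements : List (List (List Int))) (number : Int) (out : List (List (List Int))) : Prop := out = deleteLayer_alt elements number
instance (elements : List (List (List Int))) (number : Int) (out : List (List (List Int))) : Decidable (Spec_deleteLayer elements number out) := by unfold Spec_deleteLayer; infer_instance

-- ===== CLAIM (what is proved, stated in full; the proofs are below) =====
def Claim_equal_deleteLayer : Prop := ∀ (elements : List (List (List Int))) (number : Int), Dom_deleteLayer elements number → Pre_deleteLayer elements number → Spec_deleteLayer elements number (deleteLayer elements number)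

-- ===== LEMMAS AND PROOFS =====

-- the "survives the removal pass" predicate
def pvPred (number : Int) (e : List Int) : Bool := !(PySem.List.pyGet? e 1 == some number)

lemma pvFilter_erase (number : Int) (e : List Int) (h : pvPred number e = false) :
    ∀ l : List (List Int), (l.erase e).filter (pvPred number) = l.filter (pvPred number) := by
  intro l
  induction l with
  | nil => rfl
  | cons x xs ih =>
      by_cases hx : x = e
      · subst hx
        simp [List.erase_cons_head, h]
      · rw [List.erase_cons_tail (by simpa using hx)]
        simp [List.filter_cons, ih]

lemma pvRemLoop_eq_filter (number : Int) :
    ∀ (n : Nat) (a b : List (List Int)), a.length = n →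
      (∀ e ∈ b, pvPred number e = true) →
      pvRemLoop number n (a ++ b) = a.filter (pvPred number) ++ b := by
  intro n
  induction n with
  | zero =>
      intro a b ha _
      rw [List.length_eq_zero_iff] at ha
      subst ha; rfl
  | succ k ih =>
      intro a b ha hb
      rcases a.eq_nil_or_concat with rfl | ⟨a', e, rfl⟩
      · simp at ha
      simp only [List.concat_eq_append] at ha ⊢
      have hlen : a'.length = k := by simpa using ha
      have hget : PySem.List.pyGet? ((a' ++ [e]) ++ b) (a'.length : Int) = some e := by
        rw [List.append_assoc, List.singleton_append]
        exact PySem.List.pyGet?_append_length a' b e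
      by_cases he : PySem.List.pyGet? e 1 = some number
      · -- element removed: erase the first occurrence of e (it is not in b)
        have hpred : pvPred number e = false := by simp [pvPred, he]
        have hmem : e ∈ (a' ++ [e]) ++ b := by simp
        have hstep : pvRemStep number ((a' ++ [e]) ++ b) k
            = ((a' ++ [e]).erase e) ++ b := by
          rw [pvRemStep, ← hlen, hget]
          simp only [he, if_pos]
          rw [PySem.List.remove?_eq_some_erase _ _ hmem, Option.getD_some]
          have henb : e ∉ b := by
            intro hcon
            have := hb e hcon
            rw [hpred] at this
            exact Bool.false_ne_true this
          exact List.erase_append_left (l₂ := b) (by simp)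
        have hlen2 : ((a' ++ [e]).erase e).length = k := by
          rw [List.length_erase_of_mem (by simp)]
          simpa using ha
        rw [pvRemLoop, hstep, ih _ b hlen2 hb]
        rw [pvFilter_erase number e hpred]
      · -- element kept: it moves into the clean suffix
        have hpred : pvPred number e = true := by simp [pvPred, he]
        have hstep : pvRemStep number ((a' ++ [e]) ++ b) k = (a' ++ [e]) ++ b := by
          rw [pvRemStep, ← hlen, hget]
          simp [he]
        have hb' : ∀ x ∈ e :: b, pvPred number x = true := by
          intro x hx
          rcases List.mem_cons.mp hx with rfl | hx
          · exact hpred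
          · exact hb x hx
        rw [pvRemLoop, hstep, List.append_assoc, List.singleton_append,
          ih a' (e :: b) hlen hb']
        simp [List.filter_append, hpred]

lemma pvMapFilter (number : Int) : ∀ l : List (List Int),
    (l.filter (pvPred number)).map (pvIncElem number) = l.filterMap (pvKeep number) := by
  intro l
  induction l with
  | nil => rfl
  | cons e rest ih =>
      rw [List.filter_cons, List.filterMap_cons]
      cases hg : PySem.List.pyGet? e 1 with
      | none =>
          have hp : pvPred number e = true := by simp [pvPred, hg]
          have hk : pvKeep number e = some e := by simp [pvKeep, hg]
          simp [hp, hk, pvIncElem, hg, ih]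
      | some v =>
          by_cases hv : v = number
          · have hp : pvPred number e = false := by simp [pvPred, hg, hv]
            have hk : pvKeep number e = none := by simp [pvKeep, hg, hv]
            simp [hp, hk, ih]
          · have hp : pvPred number e = true := by simp [pvPred, hg, hv]
            have hk : pvKeep number e
                = some (if v < number then PySem.List.pySetD e 1 (v + 1) else e) := by
              by_cases hlt : v < number <;> simp [pvKeep, hg, hv, hlt]
            simp [hp, hk, pvIncElem, hg, ih]

lemma pvRow_eq (number : Int) (row : List (List Int)) :
    (pvRemLoop number row.length row).map (pvIncElem number)
      = row.filterMap (pvKeep number) := by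
  have h := pvRemLoop_eq_filter number row.length row [] rfl (by simp)
  simp only [List.append_nil] at h
  rw [h, pvMapFilter]

-- ===== VERDICT (by name: the statement is the Claim_ definition above) =====
theorem deleteLayer_spec : Claim_equal_deleteLayer := by
  intro elements number _ _
  unfold Spec_deleteLayer deleteLayer deleteLayer_alt
  simp only [List.map_map]
  refine List.map_congr_left ?_
  intro row _
  exact pvRow_eq number row
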